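-- pv_equiv track=rewrite | github.com/hayan5/csci-3104 | ps10/Ayan-Harrison-PS10b-Q1.py | commonSubstrings
-- ===== SOURCE A (Python) =====
-- def commonSubstrings(x, L, a):
--   subStrings = []
--   y = ''
--   i = 0
--
--   for inst in a:
--     if inst == 'no-op':
--       y = y + x[i]
--
--     else:
--       if len(y) >= L:
--         subStrings.append(y)
--       y = ''
--
--     if inst != 'insert':
--       i = i + 1
--
--   if len(y) >= L:
--         subStrings.append(y)
--
--   return(subStrings)
-- ===== SOURCE B (Python) =====
-- def commonSubstrings(x, L, a):
--     # Staged re-implementation: first annotate every instruction position with the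
--     # character it copies (None for non-copying instructions), then cut the position
--     # axis at every non-'no-op' instruction and read each segment off the annotation.
--     chars = []
--     i = 0
--     for inst in a:
--         chars.append(x[i] if inst == 'no-op' else None)
--         i += inst != 'insert'
--     cuts = [j for j, inst in enumerate(a) if inst != 'no-op']
--     out = []
--     for lo, hi in zip([-1] + cuts, cuts + [len(a)]):
--         seg = ''.join(chars[j] for j in range(lo + 1, hi))
--         if len(seg) >= L:
--             out.append(seg)
--     return out
-- ===== Notes on version B (the rewrite author's own statement) =====
-- stated objective: alternative
-- what changed: A interleaves everything in one accumulate-and-flush pass over the instructions (growing a string y and length-testing it at every non-no-op instruction and once more after the loop); B is a staged pipeline: one pass annotates each instruction position with the character it copies (None for non-copying instructions), then the cut positions (non-'no-op' instructions) are listed, and each output segment is read off the annotation between consecutive cuts and filtered by length.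
import Mathlib
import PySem

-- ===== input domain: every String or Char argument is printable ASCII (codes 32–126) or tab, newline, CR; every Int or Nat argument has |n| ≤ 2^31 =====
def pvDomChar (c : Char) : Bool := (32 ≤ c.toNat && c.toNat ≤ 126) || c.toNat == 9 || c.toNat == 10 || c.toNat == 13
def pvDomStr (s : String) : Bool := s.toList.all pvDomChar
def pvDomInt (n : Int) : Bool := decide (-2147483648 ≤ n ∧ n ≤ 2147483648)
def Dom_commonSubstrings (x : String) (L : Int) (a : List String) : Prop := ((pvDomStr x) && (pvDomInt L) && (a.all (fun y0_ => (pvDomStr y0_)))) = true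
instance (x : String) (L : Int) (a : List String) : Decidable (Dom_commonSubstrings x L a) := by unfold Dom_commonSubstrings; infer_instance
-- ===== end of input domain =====

-- B replaces A's single accumulate-and-flush pass by a staged pipeline (annotate
-- each position with its copied character, list the cut positions, then read each
-- segment off the annotation between consecutive cuts); objective: alternative.
-- Return-value equivalence only; neither version mutates its arguments.

-- ===== PORT A =====
-- one step of A's for-loop over the state (subStrings, y, i); x[i] → PySem.Str.pyGet?
-- (x[i] out of range = IndexError is excluded by Pre_; the .getD ' ' default is never
-- reached inside Pre_)
def pvAStep (x : String) (L : Int) (st : List String × String × Int) (inst : String) : List String × String × Int :=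
  let (subs, y, i) := st
  let (subs, y) :=
    if inst = "no-op" then (subs, y.push ((PySem.Str.pyGet? x i).getD ' '))
    else ((if L ≤ PySem.Str.len y then subs ++ [y] else subs), "")
  (subs, y, if inst ≠ "insert" then i + 1 else i)

def commonSubstrings (x : String) (L : Int) (a : List String) : List String :=
  let st := a.foldl (pvAStep x L) ([], "", 0)
  if L ≤ PySem.Str.len st.2.1 then st.1 ++ [st.2.1] else st.1

-- ===== PORT B =====
-- stage 1 of Source B: chars.append(x[i] if inst == 'no-op' else None); i += inst != 'insert'
def pvBAnn (x : String) (st : List (Option Char) × Int) (inst : String) : List (Option Char) × Int :=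
  (st.1 ++ [if inst = "no-op" then some ((PySem.Str.pyGet? x st.2).getD ' ') else none],
   st.2 + (if inst ≠ "insert" then 1 else 0))

def commonSubstrings_alt (x : String) (L : Int) (a : List String) : List String :=
  let chars := (a.foldl (pvBAnn x) ([], 0)).1
  let cuts := ((PySem.List.enumerate a).filter (fun p => p.2 ≠ "no-op")).map (fun p => p.1)
  let pairs := List.zip ((-1 : Int) :: cuts) (cuts ++ [(a.length : Int)])
  pairs.foldl (fun out p =>
    let seg := String.ofList ((PySem.List.pyRange (p.1 + 1) p.2 1).map
        (fun j => ((PySem.List.pyGet? chars j).getD none).getD ' '))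
    if L ≤ PySem.Str.len seg then out ++ [seg] else out) []

-- ===== PRECONDITION & SPEC =====
-- Pre_ excludes exactly the inputs where A raises IndexError: some 'no-op' instruction
-- reads x[i] with i ≥ len(x) (i = number of preceding non-'insert' instructions).
def Pre_commonSubstrings (x : String) (L : Int) (a : List String) : Prop :=
  ∀ j : Nat, j < a.length → a[j]? = some "no-op" →
    ((a.take j).countP (fun s => s ≠ "insert")) < x.toList.length
instance (x : String) (L : Int) (a : List String) : Decidable (Pre_commonSubstrings x L a) := by unfold Pre_commonSubstrings; infer_instance

def pvWitness_commonSubstrings : String × Int × List String := ("ab", 1, ["no-op", "insert", "no-op", "delete"])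

def Spec_commonSubstrings (x : String) (L : Int) (a : List String) (out : List String) : Prop := out = commonSubstrings_alt x L a
instance (x : String) (L : Int) (a : List String) (out : List String) : Decidable (Spec_commonSubstrings x L a out) := by unfold Spec_commonSubstrings; infer_instance

-- ===== CLAIM (what is proved, stated in full; the proofs are below) =====
def Claim_equal_commonSubstrings : Prop := ∀ (x : String) (L : Int) (a : List String), Dom_commonSubstrings x L a → Pre_commonSubstrings x L a → Spec_commonSubstrings x L a (commonSubstrings x L a)

-- ===== LEMMAS AND PROOFS =====

-- the common description of both programs' output: the maximal copied runs, as
-- lists of characters, starting at char index i with the current run cur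
def pvRuns (x : String) : List String → Int → List Char → List (List Char)
  | [], _, cur => [cur]
  | inst :: rest, i, cur =>
    if inst = "no-op" then
      pvRuns x rest (i + 1) (cur ++ [(PySem.Str.pyGet? x i).getD ' '])
    else cur :: pvRuns x rest (i + (if inst ≠ "insert" then 1 else 0)) []

-- recursive descriptions of B's stage-1 annotation and of its cut positions
def pvAnn (x : String) : List String → Int → List (Option Char)
  | [], _ => []
  | inst :: rest, i =>
    (if inst = "no-op" then some ((PySem.Str.pyGet? x i).getD ' ') else none) ::
      pvAnn x rest (i + (if inst ≠ "insert" then 1 else 0))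

def pvCuts : List String → List Int
  | [] => []
  | inst :: rest =>
    (if inst ≠ "no-op" then [(0 : Int)] else []) ++ (pvCuts rest).map (· + 1)

def pvSeg (chars : List (Option Char)) (p : Int × Int) : List Char :=
  (PySem.List.pyRange (p.1 + 1) p.2 1).map
    (fun j => ((PySem.List.pyGet? chars j).getD none).getD ' ')

def pvSegs (chars : List (Option Char)) (cuts : List Int) (n : Int) : List (List Char) :=
  (List.zip ((-1 : Int) :: cuts) (cuts ++ [n])).map (pvSeg chars)

def pvConsHead (c : List Char) : List (List Char) → List (List Char)
  | [] => [c]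
  | l :: ls => (c ++ l) :: ls

theorem pvFoldAnn (x : String) (a : List String) :
    ∀ (l : List (Option Char)) (i : Int),
      (a.foldl (pvBAnn x) (l, i)).1 = l ++ pvAnn x a i := by
  induction a with
  | nil => intro l i; simp [pvAnn]
  | cons inst rest ih =>
      intro l i
      simp only [List.foldl_cons, pvBAnn, pvAnn]
      rw [ih]
      simp

theorem pvCutsEnum (a : List String) :
    ∀ s : Int, ((PySem.List.enumerate a s).filter (fun p => p.2 ≠ "no-op")).map (fun p => p.1)
      = (pvCuts a).map (· + s) := by
  induction a with
  | nil => intro s; simp [PySem.List.enumerate_nil, pvCuts]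
  | cons inst rest ih =>
      intro s
      rw [PySem.List.enumerate_cons, List.filter_cons]
      by_cases h : inst = "no-op"
      · rw [if_neg (by simp [h]),
          show pvCuts (inst :: rest) = (pvCuts rest).map (· + 1) from by simp [pvCuts, h],
          ih (s + 1), List.map_map]
        apply List.map_congr_left
        intro d _
        simp [Function.comp]
        ring
      · rw [if_pos (by simp [h]),
          show pvCuts (inst :: rest) = (0 : Int) :: (pvCuts rest).map (· + 1) from by simp [pvCuts, h]]
        simp only [List.map_cons, ih (s + 1), List.map_map]
        congr 1
        · simp
        · apply List.map_congr_left
          intro d _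
          simp [Function.comp]
          ring

theorem pvCuts_nonneg (a : List String) : ∀ c ∈ pvCuts a, 0 ≤ c := by
  induction a with
  | nil => simp [pvCuts]
  | cons inst rest ih =>
      intro c hc
      simp only [pvCuts, List.mem_append, List.mem_map] at hc
      rcases hc with hc | ⟨d, hd, rfl⟩
      · split at hc <;> simp_all
      · have := ih d hd; omega

theorem pvGet_cons_succ {α : Type} (o : α) (l : List α) (j : Int) (h : 0 ≤ j) :
    PySem.List.pyGet? (o :: l) (j + 1) = PySem.List.pyGet? l j := by
  rw [PySem.List.pyGet?_of_nonneg _ (by omega : (0:Int) ≤ j + 1),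
      PySem.List.pyGet?_of_nonneg _ h]
  have hnat : (j + 1).toNat = j.toNat + 1 := by omega
  rw [hnat]
  simp

theorem pvRange_shift (a b : Int) :
    PySem.List.pyRange (a + 1) (b + 1) 1 = (PySem.List.pyRange a b 1).map (· + 1) := by
  rw [PySem.List.pyRange_one, PySem.List.pyRange_one]
  have hab : (b + 1 - (a + 1)).toNat = (b - a).toNat := by omega
  rw [hab, List.map_map]
  apply List.map_congr_left
  intro k _
  simp [Function.comp]
  ring

theorem pvSeg_shift (o : Option Char) (chars : List (Option Char)) (lo hi : Int)
    (hlo : -1 ≤ lo) :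
    pvSeg (o :: chars) (lo + 1, hi + 1) = pvSeg chars (lo, hi) := by
  unfold pvSeg
  simp only
  rw [pvRange_shift, List.map_map]
  apply List.map_congr_left
  intro j hj
  have hj0 : 0 ≤ j := by
    have := (PySem.List.mem_pyRange_one).1 hj
    omega
  simp only [Function.comp]
  rw [pvGet_cons_succ _ _ _ hj0]

theorem pvSegsShift (o : Option Char) (A' : List (Option Char)) (l1 l2 : List Int)
    (h1 : ∀ c ∈ l1, -1 ≤ c) :
    (List.zip (l1.map (· + 1)) (l2.map (· + 1))).map (pvSeg (o :: A'))
      = (List.zip l1 l2).map (pvSeg A') := by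
  rw [List.zip_map, List.map_map]
  apply List.map_congr_left
  intro p hp
  obtain ⟨u, v⟩ := p
  obtain ⟨hu, -⟩ := List.of_mem_zip hp
  simp only [Function.comp, Prod.map]
  exact pvSeg_shift o A' u v (h1 u hu)

theorem pvSegHead (c : Char) (A' : List (Option Char)) (h : Int) (hh : 0 ≤ h) :
    pvSeg (some c :: A') (-1, h + 1) = c :: pvSeg A' (-1, h) := by
  unfold pvSeg
  simp only
  rw [show (-1 : Int) + 1 = 0 by ring]
  rw [PySem.List.pyRange_one_cons (by omega : (0:Int) < h + 1)]
  simp only [List.map_cons]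
  congr 1
  · simp
  · have := pvSeg_shift (some c) A' (-1) h (by omega)
    unfold pvSeg at this
    simpa using this

theorem pvSegsNoop (c : Char) (A' : List (Option Char)) (C : List Int) (n : Int)
    (hn : 0 ≤ n) (hC : ∀ d ∈ C, 0 ≤ d) :
    pvSegs (some c :: A') (C.map (· + 1)) (n + 1) = pvConsHead [c] (pvSegs A' C n) := by
  cases C with
  | nil =>
      simp only [pvSegs, List.map_nil, List.nil_append, List.zip_cons_cons,
        List.zip_nil_right, List.map_cons, List.map_nil]
      rw [pvSegHead c A' n hn]
      simp [pvConsHead]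
  | cons c0 C' =>
      have hc0 : 0 ≤ c0 := hC c0 (by simp)
      simp only [pvSegs, List.map_cons, List.cons_append, List.zip_cons_cons, List.map_cons]
      rw [pvSegHead c A' c0 hc0]
      have htail : (List.zip ((c0 + 1) :: C'.map (· + 1)) ((C'.map (· + 1)) ++ [n + 1])).map (pvSeg (some c :: A'))
          = (List.zip (c0 :: C') (C' ++ [n])).map (pvSeg A') := by
        have hcons : (c0 + 1) :: C'.map (· + 1) = (c0 :: C').map (· + 1) := by simp
        have happ : (C'.map (· + 1)) ++ [n + 1] = (C' ++ [n]).map (· + 1) := by simp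
        rw [hcons, happ]
        exact pvSegsShift (some c) A' (c0 :: C') (C' ++ [n])
          (fun d hd => by have := hC d hd; omega)
      rw [htail]
      simp [pvConsHead]

theorem pvSegsCut (A' : List (Option Char)) (C : List Int) (n : Int)
    (hC : ∀ d ∈ C, 0 ≤ d) :
    pvSegs (none :: A') ((0 : Int) :: C.map (· + 1)) (n + 1) = [] :: pvSegs A' C n := by
  simp only [pvSegs, List.cons_append, List.zip_cons_cons, List.map_cons]
  have hhead : pvSeg (none :: A') (-1, 0) = [] := by
    unfold pvSeg
    simp only
    rw [show (-1 : Int) + 1 = 0 by ring, PySem.List.pyRange_one_eq_nil (by omega : (0:Int) ≤ 0)]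
    rfl
  rw [hhead]
  congr 1
  have h0 : ((0 : Int) :: C.map (· + 1)) = ((-1 : Int) :: C).map (· + 1) := by
    simp
  have h1 : (C.map (· + 1)) ++ [n + 1] = (C ++ [n]).map (· + 1) := by simp
  rw [h0, h1, pvSegsShift none A' ((-1 : Int) :: C) (C ++ [n])]
  intro d hd
  rcases List.mem_cons.1 hd with hd | hd
  · omega
  · have := hC d hd; omega

theorem pvConsHead_consHead (c d : List Char) (S : List (List Char)) :
    pvConsHead c (pvConsHead d S) = pvConsHead (c ++ d) S := by
  cases S <;> simp [pvConsHead]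

theorem pvSegs_ne_nil (A : List (Option Char)) (C : List Int) (n : Int) :
    pvSegs A C n ≠ [] := by
  cases C <;> simp [pvSegs, List.zip_cons_cons]

theorem pvConsHead_nil (S : List (List Char)) (h : S ≠ []) : pvConsHead [] S = S := by
  cases S with
  | nil => simp at h
  | cons l ls => simp [pvConsHead]

-- the core: B's staged segments are exactly the runs of the accumulator pass
theorem pvCore (x : String) (a : List String) :
    ∀ (i : Int) (cur : List Char),
      pvConsHead cur (pvSegs (pvAnn x a i) (pvCuts a) (a.length : Int)) = pvRuns x a i cur := by
  induction a with
  | nil =>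
      intro i cur
      simp only [pvAnn, pvCuts, pvRuns, pvSegs, List.nil_append, List.length_nil,
        Nat.cast_zero, List.zip_cons_cons, List.zip_nil_right, List.map_cons, List.map_nil]
      have : pvSeg [] (-1, 0) = [] := by
        unfold pvSeg
        simp only
        rw [show (-1 : Int) + 1 = 0 by ring, PySem.List.pyRange_one_eq_nil (by omega : (0:Int) ≤ 0)]
        rfl
      rw [this]
      simp [pvConsHead]
  | cons inst rest ih =>
      intro i cur
      by_cases h : inst = "no-op"
      · subst h
        have hAnn : pvAnn x ("no-op" :: rest) i
            = some ((PySem.Str.pyGet? x i).getD ' ') :: pvAnn x rest (i + 1) := by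
          simp [pvAnn]
        have hCuts : pvCuts ("no-op" :: rest) = (pvCuts rest).map (· + 1) := by
          simp [pvCuts]
        have hLen : ((("no-op" :: rest) : List String).length : Int) = (rest.length : Int) + 1 := by
          simp
        rw [hAnn, hCuts, hLen,
          pvSegsNoop _ _ _ _ (by positivity) (pvCuts_nonneg rest),
          pvConsHead_consHead,
          ih (i + 1) (cur ++ [(PySem.Str.pyGet? x i).getD ' '])]
        simp [pvRuns]
      · have hAnn : pvAnn x (inst :: rest) i
            = none :: pvAnn x rest (i + (if inst ≠ "insert" then 1 else 0)) := by
          simp [pvAnn, h]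
        have hCuts : pvCuts (inst :: rest) = (0 : Int) :: (pvCuts rest).map (· + 1) := by
          simp [pvCuts, h]
        have hLen : (((inst :: rest) : List String).length : Int) = (rest.length : Int) + 1 := by
          simp
        have hstep : pvRuns x (inst :: rest) i cur
            = cur :: pvRuns x rest (i + (if inst ≠ "insert" then 1 else 0)) [] := by
          simp [pvRuns, h]
        rw [hAnn, hCuts, hLen, pvSegsCut _ _ _ (pvCuts_nonneg rest), hstep,
          ← ih (i + (if inst ≠ "insert" then 1 else 0)) [],
          pvConsHead_nil _ (pvSegs_ne_nil _ _ _)]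
        simp [pvConsHead]

-- A's loop computes the filtered runs
theorem pvAInv (x : String) (L : Int) (a : List String) :
    ∀ (subs : List String) (cur : List Char) (i : Int),
      (let st := a.foldl (pvAStep x L) (subs, String.ofList cur, i);
       if L ≤ PySem.Str.len st.2.1 then st.1 ++ [st.2.1] else st.1)
      = subs ++ ((pvRuns x a i cur).filter (fun l => decide (L ≤ (l.length : Int)))).map String.ofList := by
  induction a with
  | nil =>
      intro subs cur i
      simp only [List.foldl_nil, pvRuns, List.filter]
      by_cases h : L ≤ (cur.length : Int)
      · simp [PySem.Str.len, h]
      · simp [PySem.Str.len, h]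
  | cons inst rest ih =>
      intro subs cur i
      simp only [List.foldl_cons]
      by_cases hno : inst = "no-op"
      · have hins : inst ≠ "insert" := by subst hno; decide
        have hstep : pvAStep x L (subs, String.ofList cur, i) inst
            = (subs, String.ofList (cur ++ [(PySem.Str.pyGet? x i).getD ' ']), i + 1) := by
          simp [pvAStep, hno]
          apply String.ext
          simp
        rw [hstep, ih subs (cur ++ [(PySem.Str.pyGet? x i).getD ' ']) (i + 1)]
        simp [pvRuns, hno]
      · have hstep : pvAStep x L (subs, String.ofList cur, i) inst
            = ((if L ≤ PySem.Str.len (String.ofList cur) then subs ++ [String.ofList cur] else subs),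
               String.ofList [], i + (if inst ≠ "insert" then 1 else 0)) := by
          simp only [pvAStep, if_neg hno]
          rw [show (if inst ≠ "insert" then i + 1 else i)
              = i + (if inst ≠ "insert" then 1 else 0) from by split <;> ring]
        rw [hstep, ih _ [] (i + (if inst ≠ "insert" then 1 else 0))]
        have hruns : pvRuns x (inst :: rest) i cur
            = cur :: pvRuns x rest (i + (if inst ≠ "insert" then 1 else 0)) [] := by
          simp [pvRuns, hno]
        rw [hruns]
        simp only [List.filter_cons]
        by_cases h : L ≤ (cur.length : Int)
        · simp [PySem.Str.len, h]
        · simp [PySem.Str.len, h]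

-- B's append-if fold is a filter-then-map
theorem pvFoldIf {α β : Type} (L : Int) (f : α → β) (g : β → Int) (l : List α) :
    ∀ acc : List β,
      l.foldl (fun out p => let s := f p; if L ≤ g s then out ++ [s] else out) acc
      = acc ++ ((l.filter (fun p => decide (L ≤ g (f p)))).map f) := by
  induction l with
  | nil => intro acc; simp
  | cons p rest ih =>
      intro acc
      simp only [List.foldl_cons, List.filter_cons]
      by_cases h : L ≤ g (f p)
      · rw [ih]
        simp [h]
      · rw [ih]
        simp [h]

-- ===== VERDICT (by name: the statement is the Claim_ definition above) =====
theorem commonSubstrings_spec : Claim_equal_commonSubstrings := by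
  intro x L a _ _
  unfold Spec_commonSubstrings commonSubstrings commonSubstrings_alt
  simp only
  have hchars : (a.foldl (pvBAnn x) ([], 0)).1 = pvAnn x a 0 := by
    simpa using pvFoldAnn x a [] 0
  have hcuts : ((PySem.List.enumerate a 0).filter (fun p => p.2 ≠ "no-op")).map (fun p => p.1)
      = pvCuts a := by
    have h0 := pvCutsEnum a 0
    have hid : (pvCuts a).map (· + (0:Int)) = pvCuts a := by
      simp
    rw [h0, hid]
  rw [hchars, hcuts]
  have hfun : (fun (out : List String) (p : Int × Int) =>
        let seg := String.ofList ((PySem.List.pyRange (p.1 + 1) p.2 1).map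
          (fun j => ((PySem.List.pyGet? (pvAnn x a 0) j).getD none).getD ' '));
        if L ≤ PySem.Str.len seg then out ++ [seg] else out)
      = (fun (out : List String) (p : Int × Int) =>
        let s := String.ofList (pvSeg (pvAnn x a 0) p);
        if L ≤ PySem.Str.len s then out ++ [s] else out) := rfl
  rw [hfun, pvFoldIf L (fun p => String.ofList (pvSeg (pvAnn x a 0) p)) PySem.Str.len]
  have hfix :
      (((List.zip ((-1 : Int) :: pvCuts a) (pvCuts a ++ [(a.length : Int)])).filter
          (fun p => decide (L ≤ PySem.Str.len (String.ofList (pvSeg (pvAnn x a 0) p))))).map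
        (fun p => String.ofList (pvSeg (pvAnn x a 0) p)))
      = ((((List.zip ((-1 : Int) :: pvCuts a) (pvCuts a ++ [(a.length : Int)])).map
            (pvSeg (pvAnn x a 0))).filter (fun l => decide (L ≤ (l.length : Int)))).map
          String.ofList) := by
    rw [List.filter_map, List.map_map]
    congr 1
    apply List.filter_congr
    intro p _
    simp [PySem.Str.len_eq]
  rw [hfix]
  have hsegs : (List.zip ((-1 : Int) :: pvCuts a) (pvCuts a ++ [(a.length : Int)])).map
        (pvSeg (pvAnn x a 0)) = pvRuns x a 0 [] := by
    have hcore := pvCore x a 0 []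
    rw [← hcore, pvConsHead_nil _ (pvSegs_ne_nil _ _ _)]
    rfl
  rw [hsegs]
  have hA := pvAInv x L a [] [] 0
  simpa using hA
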